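-- pv_equiv track=rewrite | github.com/bamboosingsinwind/interview | interview_code/.history/python/xiecheng0504-3_20230511003113.py | check
-- ===== SOURCE A (Python) =====
-- def check(str1):
--     n = len(str1)
--
--     if n < 2:
--         return True
--
--     for i in range(n-1):
--         if str1[i] == str1[i+1] and str1[i]!='?':
--             return False
--
--     if n < 3:
--         return True
--
--     for i in range(len(str1)-2):
--         cnt = str1[i:i+3].count('1')
--         if cnt % 2:
--             return False
--
--     return True
-- ===== SOURCE B (Python) =====
-- def check(str1):
--     # pairwise/stride scans over zipped shifts instead of index loops
--     ok_adj = all(a != b or a == '?' for a, b in zip(str1, str1[1:]))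
--     if len(str1) < 3:
--         return ok_adj
--     even0 = str1[:3].count('1') % 2 == 0
--     stride = all((a == '1') == (b == '1') for a, b in zip(str1, str1[3:]))
--     return ok_adj and even0 and stride
-- ===== Notes on version B (the rewrite author's own statement) =====
-- stated objective: alternative
-- what changed: B drops A's index loops and window recounts: it zips the string with its shifts, checking adjacency pairwise and replacing the overlapping 3-window counts by the first window's parity plus a stride-3 equality scan.
import Mathlib
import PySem

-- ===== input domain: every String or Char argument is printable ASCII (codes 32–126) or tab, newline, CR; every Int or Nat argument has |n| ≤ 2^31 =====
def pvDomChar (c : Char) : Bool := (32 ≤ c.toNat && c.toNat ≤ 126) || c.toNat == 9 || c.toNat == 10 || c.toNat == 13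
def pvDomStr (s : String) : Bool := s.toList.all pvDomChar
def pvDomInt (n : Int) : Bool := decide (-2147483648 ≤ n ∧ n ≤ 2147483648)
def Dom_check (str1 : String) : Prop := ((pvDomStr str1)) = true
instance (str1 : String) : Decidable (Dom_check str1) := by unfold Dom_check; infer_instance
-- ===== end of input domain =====

-- B zips the string with its shifts (pairwise adjacency, first-window parity + stride-3 scan) instead of A's index loops with per-window recounts (alternative algorithm, same cost class).

-- ===== PORT A =====
-- Loops with 'return False' are ported as List.any over the same index range
-- (first failing index stops both). str1[i] with 0 ≤ i < n is exact as getD;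
-- str1[i:i+3] with 0 ≤ i is exact as (drop i).take 3.
def check (str1 : String) : Bool :=
  let s := str1.toList
  let n := s.length
  if n < 2 then true
  else if (List.range (n-1)).any (fun i => s.getD i ' ' == s.getD (i+1) ' ' && s.getD i ' ' != '?') then false
  else if n < 3 then true
  else if (List.range (n-2)).any (fun i => ((s.drop i).take 3).count '1' % 2 == 1) then false
  else true

-- ===== PORT B =====
-- zip(str1, str1[k:]) is exact as s.zip (s.drop k); all(...) as List.all.
def check_alt (str1 : String) : Bool :=
  let s := str1.toList
  let okAdj := (s.zip (s.drop 1)).all (fun p => p.1 != p.2 || p.1 == '?')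
  if s.length < 3 then okAdj
  else
    let even0 := (s.take 3).count '1' % 2 == 0
    let stride := (s.zip (s.drop 3)).all (fun p => (p.1 == '1') == (p.2 == '1'))
    okAdj && even0 && stride

-- ===== PRECONDITION & SPEC =====
def Spec_check (str1 : String) (out : Bool) : Prop := out = check_alt str1
instance (str1 : String) (out : Bool) : Decidable (Spec_check str1 out) := by unfold Spec_check; infer_instance

-- ===== CLAIM (what is proved, stated in full; the proofs are below) =====
def Claim_equal_check : Prop := ∀ (str1 : String), Dom_check str1 → Spec_check str1 (check str1)

-- ===== LEMMAS AND PROOFS =====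

-- B's zip-with-shift scans, characterized by indices
theorem pv_zip_all (s : List Char) (k : Nat) (p : Char × Char → Bool) :
    ((s.zip (s.drop k)).all p = true) ↔
    (∀ i, i + k < s.length → p (s.getD i ' ', s.getD (i+k) ' ') = true) := by
  rw [List.all_eq_true]
  constructor
  · intro h i hi
    have hlen : i < (s.zip (s.drop k)).length := by
      simp only [List.length_zip, List.length_drop]; omega
    have hmem := h ((s.zip (s.drop k))[i]) (List.getElem_mem hlen)
    have h1 : i < s.length := by omega
    have h2 : i < (s.drop k).length := by simp [List.length_drop]; omega
    rw [List.getElem_zip, List.getElem_drop] at hmem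
    rw [List.getD_eq_getElem s ' ' h1, List.getD_eq_getElem s ' ' hi]
    simpa [Nat.add_comm] using hmem
  · intro h x hx
    obtain ⟨i, hlen, rfl⟩ := List.mem_iff_getElem.mp hx
    have hi : i + k < s.length := by
      simp only [List.length_zip, List.length_drop] at hlen; omega
    have hthis := h i hi
    rw [List.getD_eq_getElem s ' ' (by omega : i < s.length), List.getD_eq_getElem s ' ' hi] at hthis
    rw [List.getElem_zip, List.getElem_drop]
    simpa [Nat.add_comm] using hthis

-- the zip with a shift beyond the length is empty, so the scan is vacuously true
theorem pv_zip_short (s : List Char) (k : Nat) (p : Char × Char → Bool)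
    (h : s.length ≤ k) : (s.zip (s.drop k)).all p = true := by
  rw [List.drop_eq_nil_of_le h, List.zip_nil_right]
  rfl

-- A's adjacency scan and B's pairwise zip scan agree
theorem pv_adj_iff (s : List Char) :
    (((List.range (s.length-1)).any
        (fun i => s.getD i ' ' == s.getD (i+1) ' ' && s.getD i ' ' != '?')) = false) ↔
    ((s.zip (s.drop 1)).all (fun p => p.1 != p.2 || p.1 == '?') = true) := by
  rw [pv_zip_all, ← Bool.not_eq_true, List.any_eq_true]
  simp only [List.mem_range, not_exists, not_and]
  constructor
  · intro h i hi
    have := h i (by omega)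
    by_cases c : s.getD i ' ' = s.getD (i+1) ' ' <;> simp_all
  · intro h i hi
    have := h i (by omega)
    by_cases c : s.getD i ' ' = s.getD (i+1) ' ' <;> simp_all

-- 0/1 indicator of a '1' at position i
def pvC (s : List Char) (i : Nat) : Nat := if s.getD i ' ' = '1' then 1 else 0

-- the count of a 3-window in terms of indicators
theorem pv_window (s : List Char) (i : Nat) (h : i + 2 < s.length) :
    ((s.drop i).take 3).count '1' = pvC s i + pvC s (i+1) + pvC s (i+2) := by
  have h0 : i < s.length := by omega
  have h1 : i + 1 < s.length := by omega
  rw [List.drop_eq_getElem_cons h0, List.drop_eq_getElem_cons h1,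
      show i + 1 + 1 = i + 2 from rfl, List.drop_eq_getElem_cons h]
  simp only [List.take_succ_cons, List.take_zero, List.count_cons, List.count_nil, pvC,
    List.getD_eq_getElem s ' ' h0, List.getD_eq_getElem s ' ' h1,
    List.getD_eq_getElem s ' ' h]
  by_cases c0 : s[i] = '1' <;> by_cases c1 : s[i+1] = '1' <;>
    by_cases c2 : s[i+2] = '1' <;>
    simp [c0, c1, c2, beq_iff_eq]

-- core parity equivalence on indices
theorem pv_parity (s : List Char) :
    ((∀ i, i + 2 < s.length → (pvC s i + pvC s (i+1) + pvC s (i+2)) % 2 = 0) ↔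
      (((pvC s 0 + pvC s 1 + pvC s 2) % 2 = 0 ∨ s.length < 3) ∧
        ∀ i, i + 3 < s.length → pvC s i = pvC s (i+3))) := by
  constructor
  · intro hall
    constructor
    · by_cases h3 : s.length < 3
      · exact Or.inr h3
      · exact Or.inl (hall 0 (by omega))
    · intro i hi
      have w1 := hall i (by omega)
      have w2 := hall (i+1) (by omega)
      rw [show i + 1 + 1 = i + 2 from rfl, show i + 1 + 2 = i + 3 from rfl] at w2
      have b0 : pvC s i ≤ 1 := by unfold pvC; split <;> omega
      have b3 : pvC s (i+3) ≤ 1 := by unfold pvC; split <;> omega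
      omega
  · rintro ⟨h0, hstep⟩ i
    induction i with
    | zero =>
      intro hlt
      rcases h0 with h | h
      · simpa using h
      · omega
    | succ j ih =>
      intro hj
      have hw := ih (by omega)
      have hs := hstep j (by omega)
      rw [show j + 1 + 1 = j + 2 from rfl, show j + 1 + 2 = j + 3 from rfl]
      omega

-- A's window scan accepts iff every 3-window has even '1'-count
theorem pv_A_iff (s : List Char) :
    (((List.range (s.length-2)).any
        (fun i => ((s.drop i).take 3).count '1' % 2 == 1)) = false) ↔
    (∀ i, i + 2 < s.length → (pvC s i + pvC s (i+1) + pvC s (i+2)) % 2 = 0) := by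
  rw [← Bool.not_eq_true, List.any_eq_true]
  simp only [List.mem_range, beq_iff_eq, not_exists, not_and]
  constructor
  · intro h i hi
    have := h i (by omega)
    rw [pv_window s i hi] at this
    omega
  · intro h i hi
    have hi2 : i + 2 < s.length := by omega
    rw [pv_window s i hi2]
    have := h i hi2
    omega

-- B's first-window test matches the 0-window parity
theorem pv_B0_iff (s : List Char) (h3 : ¬ s.length < 3) :
    (((s.take 3).count '1' % 2 == 0) = true) ↔
    ((pvC s 0 + pvC s 1 + pvC s 2) % 2 = 0) := by
  have : s.take 3 = (s.drop 0).take 3 := by rw [List.drop_zero]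
  rw [this, pv_window s 0 (by omega)]
  simp only [beq_iff_eq, Nat.zero_add]

-- B's stride-3 zip scan accepts iff '1'-ness repeats with stride 3
theorem pv_B1_iff (s : List Char) :
    (((s.zip (s.drop 3)).all (fun p => (p.1 == '1') == (p.2 == '1'))) = true) ↔
    (∀ i, i + 3 < s.length → pvC s i = pvC s (i+3)) := by
  rw [pv_zip_all]
  constructor
  · intro h i hi
    have := h i hi
    unfold pvC
    by_cases c0 : s.getD i ' ' = '1' <;> by_cases c3 : s.getD (i+3) ' ' = '1' <;>
      simp_all
  · intro h i hi
    have := h i hi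
    unfold pvC at this
    by_cases c0 : s.getD i ' ' = '1' <;> by_cases c3 : s.getD (i+3) ' ' = '1' <;>
      simp_all

-- ===== VERDICT (by name: the statement is the Claim_ definition above) =====
theorem check_spec : Claim_equal_check := by
  unfold Claim_equal_check Spec_check
  intro str1 _
  unfold check check_alt
  dsimp only
  set s := str1.toList with hs
  by_cases h2 : s.length < 2
  · rw [if_pos h2, if_pos (show s.length < 3 by omega), pv_zip_short s 1 _ (by omega)]
  · rw [if_neg h2]
    by_cases hadj : ((List.range (s.length-1)).any
        (fun i => s.getD i ' ' == s.getD (i+1) ' ' && s.getD i ' ' != '?')) = true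
    · rw [if_pos hadj]
      have hb : ((s.zip (s.drop 1)).all (fun p => p.1 != p.2 || p.1 == '?')) = false := by
        cases hb : ((s.zip (s.drop 1)).all (fun p => p.1 != p.2 || p.1 == '?'))
        · rfl
        · have hfalse := (pv_adj_iff s).mpr hb
          rw [hfalse] at hadj
          exact absurd hadj Bool.false_ne_true
      rw [hb]
      split <;> simp
    · have hadj' : ((List.range (s.length-1)).any
          (fun i => s.getD i ' ' == s.getD (i+1) ' ' && s.getD i ' ' != '?')) = false :=
        Bool.not_eq_true _ ▸ hadj
      rw [if_neg hadj, (pv_adj_iff s).mp hadj']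
      by_cases h3 : s.length < 3
      · rw [if_pos h3, if_pos h3]
      · rw [if_neg h3, if_neg h3, Bool.true_and]
        by_cases hA : ((List.range (s.length-2)).any
            (fun i => ((s.drop i).take 3).count '1' % 2 == 1)) = true
        · rw [if_pos hA]
          by_cases hb0 : ((s.take 3).count '1' % 2 == 0) = true
          · rw [hb0, Bool.true_and]
            have hstride : ((s.zip (s.drop 3)).all
                (fun p => (p.1 == '1') == (p.2 == '1'))) = false := by
              cases hb1 : ((s.zip (s.drop 3)).all (fun p => (p.1 == '1') == (p.2 == '1')))
              · rfl
              · have hall := (pv_parity s).mpr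
                  ⟨Or.inl ((pv_B0_iff s h3).mp hb0), (pv_B1_iff s).mp hb1⟩
                rw [(pv_A_iff s).mpr hall] at hA
                exact absurd hA Bool.false_ne_true
            rw [hstride]
          · rw [Bool.not_eq_true] at hb0
            rw [hb0]
            simp
        · have hA' : ((List.range (s.length-2)).any
              (fun i => ((s.drop i).take 3).count '1' % 2 == 1)) = false :=
            Bool.not_eq_true _ ▸ hA
          have hall := (pv_A_iff s).mp hA'
          have hpar := (pv_parity s).mp hall
          have hb0 : ((s.take 3).count '1' % 2 == 0) = true := by
            rcases hpar.1 with h | h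
            · exact (pv_B0_iff s h3).mpr h
            · omega
          have hb1 := (pv_B1_iff s).mpr hpar.2
          rw [if_neg hA, hb0, hb1]
          rfl
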